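-- pv_equiv track=rewrite | github.com/obirije/atrosa | tenant.py | _resolve_tiers
-- ===== SOURCE A (Python) =====
-- TIER_DEFINITIONS = {
--     "tier_0": {
--         "name": "Universal Telemetry",
--         "description": "API gateway, ledger, mobile, webhooks — every customer has these",
--         "sources": ["api", "db", "mobile", "webhooks"],
--         "hunt_categories": [
--             "webhook_desync",
--             "toctou_race_condition",
--             "business_logic_flaw",
--             "reversal_abuse",
--             "velocity_anomaly",
--         ],
--     },
--     "tier_1": {
--         "name": "Common Enrichment",
--         "description": "IP risk, device intel, email risk, SIM/phone intelligence",
--         "sources": ["ip_risk", "device_intel", "email_risk", "sim_intel"],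
--         "hunt_categories": [
--             "sim_swap_ato",
--             "device_farm_multi_accounting",
--             "impossible_travel_cashout",
--             "synthetic_identity_onboarding",
--             "proxy_credential_stuffing",
--             "emulator_promo_abuse",
--         ],
--     },
--     "tier_2": {
--         "name": "Identity & Verification",
--         "description": "KYC/IDV results, credit bureau, sanctions/PEP, behavioral biometrics",
--         "sources": ["kyc_idv", "credit_bureau", "sanctions_pep", "behavioral_biometrics"],
--         "hunt_categories": [
--             "kyc_gated_cashout",
--             "loan_stacking",
--             "bust_out_acceleration",
--             "authorized_push_payment",
--             "sanctions_evasion_layering",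
--             "deepfake_fast_cashout",
--         ],
--     },
--     "tier_3": {
--         "name": "Sector-Specific",
--         "description": "Blockchain, insurance, card networks, ACH, consortium, shipping, open banking",
--         "sources": [
--             "blockchain_analytics", "insurance_claims", "card_network_signals",
--             "ach_returns", "consortium_flags", "shipping_delivery", "open_banking",
--         ],
--         "hunt_categories": [
--             "crypto_mixer_layering",
--             "ghost_broking",
--             "claims_farming",
--             "bin_enumeration_escalation",
--             "ach_kiting",
--             "cross_institution_fraud",
--             "inr_chargeback_abuse",
--             "income_fabrication",
--         ],
--     },
-- }
--
-- def _resolve_tiers(data_sources: list[str]) -> list[str]: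
--     """Determine which tiers are active based on connected sources."""
--     active = ["tier_0"]  # Always active
--     for tier_name, tier_def in TIER_DEFINITIONS.items():
--         if tier_name == "tier_0":
--             continue
--         # Tier is active if ANY of its sources are connected
--         if any(s in data_sources for s in tier_def["sources"]):
--             active.append(tier_name)
--     return active
-- ===== SOURCE B (Python) =====
-- TIER_DEFINITIONS = {
--     "tier_0": {
--         "name": "Universal Telemetry",
--         "description": "API gateway, ledger, mobile, webhooks — every customer has these",
--         "sources": ["api", "db", "mobile", "webhooks"],
--         "hunt_categories": [
--             "webhook_desync",
--             "toctou_race_condition",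
--             "business_logic_flaw",
--             "reversal_abuse",
--             "velocity_anomaly",
--         ],
--     },
--     "tier_1": {
--         "name": "Common Enrichment",
--         "description": "IP risk, device intel, email risk, SIM/phone intelligence",
--         "sources": ["ip_risk", "device_intel", "email_risk", "sim_intel"],
--         "hunt_categories": [
--             "sim_swap_ato",
--             "device_farm_multi_accounting",
--             "impossible_travel_cashout",
--             "synthetic_identity_onboarding",
--             "proxy_credential_stuffing",
--             "emulator_promo_abuse",
--         ],
--     },
--     "tier_2": {
--         "name": "Identity & Verification",
--         "description": "KYC/IDV results, credit bureau, sanctions/PEP, behavioral biometrics",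
--         "sources": ["kyc_idv", "credit_bureau", "sanctions_pep", "behavioral_biometrics"],
--         "hunt_categories": [
--             "kyc_gated_cashout",
--             "loan_stacking",
--             "bust_out_acceleration",
--             "authorized_push_payment",
--             "sanctions_evasion_layering",
--             "deepfake_fast_cashout",
--         ],
--     },
--     "tier_3": {
--         "name": "Sector-Specific",
--         "description": "Blockchain, insurance, card networks, ACH, consortium, shipping, open banking",
--         "sources": [
--             "blockchain_analytics", "insurance_claims", "card_network_signals",
--             "ach_returns", "consortium_flags", "shipping_delivery", "open_banking",
--         ],
--         "hunt_categories": [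
--             "crypto_mixer_layering",
--             "ghost_broking",
--             "claims_farming",
--             "bin_enumeration_escalation",
--             "ach_kiting",
--             "cross_institution_fraud",
--             "inr_chargeback_abuse",
--             "income_fabrication",
--         ],
--     },
-- }
--
-- # Inverted index: source string -> owning tier, built once from TIER_DEFINITIONS.
-- _SOURCE_TIER = {
--     src: tier_name
--     for tier_name, tier_def in TIER_DEFINITIONS.items()
--     for src in tier_def["sources"]
-- }
--
-- def _resolve_tiers(data_sources: list[str]) -> list[str]:
--     """Determine which tiers are active based on connected sources."""
--     active = {"tier_0"}  # Always active
--     for src in data_sources: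
--         tier = _SOURCE_TIER.get(src)
--         if tier is not None:
--             active.add(tier)
--     # Emit in definition order; dedupes automatically.
--     return [t for t in TIER_DEFINITIONS if t in active]
-- ===== Notes on version B (the rewrite author's own statement) =====
-- stated objective: faster
-- what changed: Instead of scanning data_sources once per defined source via any(s in data_sources), B builds an inverted source->tier index once and makes a single pass over data_sources collecting the active tier set, then emits tiers in definition order.
import Mathlib
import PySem

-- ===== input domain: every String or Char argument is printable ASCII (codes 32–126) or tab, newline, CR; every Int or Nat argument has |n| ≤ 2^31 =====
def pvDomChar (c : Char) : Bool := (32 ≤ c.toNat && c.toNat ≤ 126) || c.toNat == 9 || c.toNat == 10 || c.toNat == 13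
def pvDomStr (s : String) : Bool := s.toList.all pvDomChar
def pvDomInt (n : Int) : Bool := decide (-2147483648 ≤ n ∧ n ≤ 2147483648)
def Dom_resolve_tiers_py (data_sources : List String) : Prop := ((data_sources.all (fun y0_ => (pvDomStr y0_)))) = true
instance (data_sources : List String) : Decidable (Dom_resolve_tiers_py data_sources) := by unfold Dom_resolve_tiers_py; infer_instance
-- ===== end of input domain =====

-- B replaces A's per-tier scans of data_sources (any(s in data_sources)) by a one-pass
-- collection over data_sources through an inverted source→tier index, then emits tiers
-- in definition order; a timing run decides the speed label.


-- ===== PORT A =====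
-- TIER_DEFINITIONS, reduced to what _resolve_tiers reads: (tier_name, sources), in dict order
def pvTiers : List (String × List String) :=
  [("tier_0", ["api", "db", "mobile", "webhooks"]),
   ("tier_1", ["ip_risk", "device_intel", "email_risk", "sim_intel"]),
   ("tier_2", ["kyc_idv", "credit_bureau", "sanctions_pep", "behavioral_biometrics"]),
   ("tier_3", ["blockchain_analytics", "insurance_claims", "card_network_signals",
               "ach_returns", "consortium_flags", "shipping_delivery", "open_banking"])]

def resolve_tiers_py (data_sources : List String) : List String :=
  pvTiers.foldl (fun active td =>
    if td.1 == "tier_0" then active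
    else if td.2.any (fun s => data_sources.contains s) then active ++ [td.1]
    else active) ["tier_0"]

-- ===== PORT B =====
-- _SOURCE_TIER: the inverted index, source → owning tier (literal dict, keys distinct)
def pvSourceTier : PySem.Dict String String :=
  PySem.Dict.mk
    [("api", "tier_0"), ("db", "tier_0"), ("mobile", "tier_0"), ("webhooks", "tier_0"),
     ("ip_risk", "tier_1"), ("device_intel", "tier_1"), ("email_risk", "tier_1"), ("sim_intel", "tier_1"),
     ("kyc_idv", "tier_2"), ("credit_bureau", "tier_2"), ("sanctions_pep", "tier_2"), ("behavioral_biometrics", "tier_2"),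
     ("blockchain_analytics", "tier_3"), ("insurance_claims", "tier_3"), ("card_network_signals", "tier_3"),
     ("ach_returns", "tier_3"), ("consortium_flags", "tier_3"), ("shipping_delivery", "tier_3"), ("open_banking", "tier_3")]

def resolve_tiers_py_alt (data_sources : List String) : List String :=
  let active : PySem.Set String :=
    data_sources.foldl (fun acc src =>
      match pvSourceTier.get? src with
      | some tier => PySem.Set.add acc tier
      | none => acc) (PySem.Set.ofList ["tier_0"])
  (pvTiers.map Prod.fst).filter (fun t => PySem.Set.contains active t)

-- ===== PRECONDITION & SPEC =====
def Spec_resolve_tiers_py (data_sources : List String) (out : List String) : Prop := out = resolve_tiers_py_alt data_sources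
instance (data_sources : List String) (out : List String) : Decidable (Spec_resolve_tiers_py data_sources out) := by unfold Spec_resolve_tiers_py; infer_instance

-- ===== CLAIM (what is proved, stated in full; the proofs are below) =====
def Claim_equal_resolve_tiers_py : Prop := ∀ (data_sources : List String), Dom_resolve_tiers_py data_sources → Spec_resolve_tiers_py data_sources (resolve_tiers_py data_sources)

-- ===== LEMMAS AND PROOFS =====

-- membership in B's accumulated active set
lemma mem_activeFold (ds : List String) (acc : PySem.Set String) (t : String) :
    t ∈ ds.foldl (fun acc src =>
      match pvSourceTier.get? src with
      | some tier => PySem.Set.add acc tier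
      | none => acc) acc ↔ t ∈ acc ∨ ∃ s ∈ ds, pvSourceTier.get? s = some t := by
  induction ds generalizing acc with
  | nil => simp
  | cons x xs ih =>
    simp only [List.foldl_cons]
    cases h : pvSourceTier.get? x with
    | none =>
      rw [ih]
      constructor
      · rintro (h1 | ⟨s, hs, h2⟩)
        · exact Or.inl h1
        · exact Or.inr ⟨s, List.mem_cons_of_mem _ hs, h2⟩
      · rintro (h1 | ⟨s, hs, h2⟩)
        · exact Or.inl h1
        · rcases List.mem_cons.mp hs with rfl | hs'
          · rw [h] at h2; cases h2
          · exact Or.inr ⟨s, hs', h2⟩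
    | some u =>
      rw [ih]
      constructor
      · rintro (h1 | ⟨s, hs, h2⟩)
        · rcases (PySem.Set.mem_add acc u t).mp h1 with h1' | rfl
          · exact Or.inl h1'
          · exact Or.inr ⟨x, List.mem_cons_self .., h⟩
        · exact Or.inr ⟨s, List.mem_cons_of_mem _ hs, h2⟩
      · rintro (h1 | ⟨s, hs, h2⟩)
        · exact Or.inl ((PySem.Set.mem_add acc u t).mpr (Or.inl h1))
        · rcases List.mem_cons.mp hs with rfl | hs'
          · rw [h] at h2
            exact Or.inl ((PySem.Set.mem_add acc u t).mpr (Or.inr (Option.some.inj h2).symm))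
          · exact Or.inr ⟨s, hs', h2⟩

-- the index lookup hits exactly the sources of the looked-up tier
lemma lookup_iff (s t : String) :
    pvSourceTier.get? s = some t ↔ (s, t) ∈ pvSourceTier.items := by
  exact PySem.Dict.get?_eq_some_iff_mem_items pvSourceTier s t (by decide)

-- ===== VERDICT (by name: the statement is the Claim_ definition above) =====
theorem resolve_tiers_py_spec : Claim_equal_resolve_tiers_py := by
  intro ds _
  unfold Spec_resolve_tiers_py resolve_tiers_py resolve_tiers_py_alt
  have hmem : ∀ t : String,
      (PySem.Set.contains (ds.foldl (fun acc src =>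
        match pvSourceTier.get? src with
        | some tier => PySem.Set.add acc tier
        | none => acc) (PySem.Set.ofList ["tier_0"])) t) = true
      ↔ (t = "tier_0" ∨ ∃ s ∈ ds, (s, t) ∈ pvSourceTier.items) := by
    intro t
    rw [PySem.Set.contains_iff, mem_activeFold]
    simp [lookup_iff]
  have hb : ∀ (t : String) (srcs : List String),
      (∀ s : String, (s, t) ∈ pvSourceTier.items ↔ s ∈ srcs) → t ≠ "tier_0" →
      PySem.Set.contains (ds.foldl (fun acc src =>
        match pvSourceTier.get? src with
        | some tier => PySem.Set.add acc tier
        | none => acc) (PySem.Set.ofList ["tier_0"])) t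
      = srcs.any (fun s => ds.contains s) := by
    intro t srcs hc hne
    by_cases hex : ∃ s ∈ ds, s ∈ srcs
    · have : srcs.any (fun s => ds.contains s) = true := by
        obtain ⟨s, hsds, hss⟩ := hex
        simp only [List.any_eq_true]
        exact ⟨s, hss, by simpa using hsds⟩
      rw [this, (hmem t).mpr (Or.inr (by obtain ⟨s, h1, h2⟩ := hex; exact ⟨s, h1, (hc s).mpr h2⟩))]
    · have h2 : srcs.any (fun s => ds.contains s) = false := by
        simp only [List.any_eq_false]
        intro s hss
        simp only [List.contains_eq_mem, decide_eq_true_eq] at *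
        intro hmm; exact hex ⟨s, hmm, hss⟩
      rw [h2]
      rw [Bool.eq_false_iff]
      intro hco
      rcases (hmem t).mp hco with h | ⟨s, h1, h3⟩
      · exact hne h
      · exact hex ⟨s, h1, (hc s).mp h3⟩
  have h1 := hb "tier_1" ["ip_risk", "device_intel", "email_risk", "sim_intel"] (by intro s; simp [pvSourceTier]) (by decide)
  have h2 := hb "tier_2" ["kyc_idv", "credit_bureau", "sanctions_pep", "behavioral_biometrics"] (by intro s; simp [pvSourceTier]) (by decide)
  have h3 := hb "tier_3" ["blockchain_analytics", "insurance_claims", "card_network_signals", "ach_returns", "consortium_flags", "shipping_delivery", "open_banking"] (by intro s; simp [pvSourceTier]) (by decide)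
  have h0 : PySem.Set.contains (ds.foldl (fun acc src =>
      match pvSourceTier.get? src with
      | some tier => PySem.Set.add acc tier
      | none => acc) (PySem.Set.ofList ["tier_0"])) "tier_0" = true :=
    (hmem "tier_0").mpr (Or.inl rfl)
  simp only [pvTiers, List.foldl_cons, List.foldl_nil, List.map, List.filter]
  rw [h0, h1, h2, h3]
  cases hc1 : List.any ["ip_risk", "device_intel", "email_risk", "sim_intel"] (fun s => ds.contains s) <;>
  cases hc2 : List.any ["kyc_idv", "credit_bureau", "sanctions_pep", "behavioral_biometrics"] (fun s => ds.contains s) <;>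
  cases hc3 : List.any ["blockchain_analytics", "insurance_claims", "card_network_signals", "ach_returns", "consortium_flags", "shipping_delivery", "open_banking"] (fun s => ds.contains s) <;>
  simp
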